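-- pv_equiv track=rewrite | github.com/essicolo/djalgo | src/djalgo/rhythm.py | beatcycle
-- ===== SOURCE A (Python) =====
-- import itertools
--
-- def beatcycle(pitches, durations):
--     """
--     Pitches are mapped to durations in a cyclical manner, then offsets are set according to successive durations.
--
--     Args:
--         pitches (list): The first list.
--         durations (list): The second list.
--
--     Returns:
--         list: A list of notes.
--     """
--     durations_cycle = itertools.cycle(durations)
--     notes = []
--     current_offset = 0
--     for p in pitches:
--         d = next(durations_cycle)
--         notes.append((p, d, current_offset))
--         current_offset += d
--     return notes
-- ===== SOURCE B (Python) =====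
-- def beatcycle(pitches, durations):
--     m = len(durations)
--     total = sum(durations)
--     offs = []
--     s = 0
--     for d in durations:
--         offs.append(s)
--         s += d
--     return [(p, durations[i % m], (i // m) * total + offs[i % m])
--             for i, p in enumerate(pitches)]
-- ===== Notes on version B (the rewrite author's own statement) =====
-- stated objective: alternative
-- what changed: Replaces A's running-offset accumulating loop over the cycled iterator with closed-form index arithmetic: a one-pass prefix table of within-cycle offsets over durations only, then each note's duration and offset are computed independently as durations[i % m] and (i // m) * sum(durations) + offs[i % m].
import Mathlib
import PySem

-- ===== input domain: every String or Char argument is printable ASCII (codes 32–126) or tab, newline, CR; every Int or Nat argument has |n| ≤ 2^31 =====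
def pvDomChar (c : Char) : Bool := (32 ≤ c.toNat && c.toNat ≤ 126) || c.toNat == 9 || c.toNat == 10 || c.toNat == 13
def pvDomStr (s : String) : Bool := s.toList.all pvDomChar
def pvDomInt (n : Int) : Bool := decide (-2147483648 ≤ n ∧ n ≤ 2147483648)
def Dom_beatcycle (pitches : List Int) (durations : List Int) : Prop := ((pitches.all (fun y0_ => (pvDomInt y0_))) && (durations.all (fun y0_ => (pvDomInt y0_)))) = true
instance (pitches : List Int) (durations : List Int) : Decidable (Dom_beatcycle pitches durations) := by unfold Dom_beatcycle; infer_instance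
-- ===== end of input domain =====

-- B replaces A's single running-offset loop over a cycled iterator with
-- closed-form index arithmetic (duration = durations[i % m], offset =
-- (i // m) * sum(durations) + within-cycle prefix table); equivalence of the
-- RETURN value on Pre_ (A raises StopIteration when durations = [] and
-- pitches ≠ []; B raises there too).

-- ===== PORT A =====
-- itertools.cycle is an iterator keeping the saved base list and the remaining
-- tail; `next` pops from the tail, refilling it from the base when exhausted
-- (raising StopIteration — modelled as returning [], excluded by Pre_ — when
-- the base itself is empty).
def beatcycleGo (durations : List Int) : List Int → List Int → Int → List (Int × Int × Int)
  | [], _, _ => []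
  | p :: ps, d :: rest, off => (p, d, off) :: beatcycleGo durations ps rest (off + d)
  | p :: ps, [], off =>
      match durations with
      | [] => []  -- next() raises StopIteration here; outside Pre_
      | d :: rest => (p, d, off) :: beatcycleGo durations ps rest (off + d)

def beatcycle (pitches : List Int) (durations : List Int) : List (Int × Int × Int) :=
  beatcycleGo durations pitches durations 0

-- ===== PORT B =====
-- the `offs` loop of Source B: within-cycle offsets (prefix sums starting from s)
def cycOffs : List Int → Int → List Int
  | [], _ => []
  | d :: ds, s => s :: cycOffs ds (s + d)

-- the list comprehension over enumerate(pitches): index-carrying map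
def altGo (durations : List Int) (m : Nat) (total : Int) (offs : List Int) : Nat → List Int → List (Int × Int × Int)
  | _, [] => []
  | i, p :: ps =>
      (p, durations.getD (i % m) 0, ((i / m : Nat) : Int) * total + offs.getD (i % m) 0)
        :: altGo durations m total offs (i + 1) ps

def beatcycle_alt (pitches : List Int) (durations : List Int) : List (Int × Int × Int) :=
  altGo durations durations.length durations.sum (cycOffs durations 0) 0 pitches

-- ===== PRECONDITION & SPEC =====
-- Pre_ excludes exactly the inputs where A raises StopIteration: non-empty
-- pitches with empty durations (B also raises there, on i % 0).
def Pre_beatcycle (pitches : List Int) (durations : List Int) : Prop :=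
  durations ≠ [] ∨ pitches = []
instance (pitches : List Int) (durations : List Int) : Decidable (Pre_beatcycle pitches durations) := by unfold Pre_beatcycle; infer_instance
def pvWitness_beatcycle : List Int × List Int := ([60, 62, 64, 65], [1, 2])

def Spec_beatcycle (pitches : List Int) (durations : List Int) (out : List (Int × Int × Int)) : Prop := out = beatcycle_alt pitches durations
instance (pitches : List Int) (durations : List Int) (out : List (Int × Int × Int)) : Decidable (Spec_beatcycle pitches durations out) := by unfold Spec_beatcycle; infer_instance

-- ===== CLAIM (what is proved, stated in full; the proofs are below) =====
def Claim_equal_beatcycle : Prop := ∀ (pitches : List Int) (durations : List Int), Dom_beatcycle pitches durations → Pre_beatcycle pitches durations → Spec_beatcycle pitches durations (beatcycle pitches durations)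

-- ===== LEMMAS AND PROOFS =====

theorem cycOffs_getD (d : List Int) : ∀ (s : Int) (r : Nat), r < d.length →
    (cycOffs d s).getD r 0 = s + (d.take r).sum := by
  induction d with
  | nil => intro s r h; simp at h
  | cons a as ih =>
    intro s r h
    cases r with
    | zero => simp [cycOffs]
    | succ r =>
      simp only [cycOffs, List.getD_cons_succ, List.take_succ_cons, List.sum_cons]
      rw [ih (s + a) r (by simpa using h)]
      ring

theorem take_succ_sum (d : List Int) : ∀ (r : Nat) (h : r < d.length),
    (d.take (r + 1)).sum = (d.take r).sum + d[r] := by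
  induction d with
  | nil => intro r h; simp at h
  | cons a as ih =>
    intro r h
    cases r with
    | zero => simp
    | succ r =>
      simp only [List.take_succ_cons, List.sum_cons, List.getElem_cons_succ]
      rw [ih r (by simpa using h)]
      ring

-- restarting the exhausted cycle tail equals starting from the full base list
theorem beatcycleGo_restart (e : Int) (es ps : List Int) (off : Int) :
    beatcycleGo (e :: es) ps [] off = beatcycleGo (e :: es) ps (e :: es) off := by
  cases ps <;> simp [beatcycleGo]

-- Main invariant: A's loop at global index i (remaining cycle tail
-- durations.drop (i % m), running offset (i / m) * total + prefix (i % m))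
-- equals B's closed-form comprehension from index i.
theorem go_eq (durations : List Int) (hne : durations ≠ []) :
    ∀ (ps : List Int) (i : Nat),
      beatcycleGo durations ps (durations.drop (i % durations.length))
          (((i / durations.length : Nat) : Int) * durations.sum + (durations.take (i % durations.length)).sum)
        = altGo durations durations.length durations.sum (cycOffs durations 0) i ps := by
  intro ps
  induction ps with
  | nil =>
    intro i
    cases h : durations.drop (i % durations.length) <;> simp [beatcycleGo, altGo]
  | cons p ps ih =>
    intro i
    have hm : 0 < durations.length := List.length_pos_iff.mpr hne
    have hr : i % durations.length < durations.length := Nat.mod_lt _ hm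
    have hdm := Nat.div_add_mod i durations.length
    rw [List.drop_eq_getElem_cons hr]
    simp only [beatcycleGo, altGo]
    refine congrArg₂ _ ?_ ?_
    · rw [cycOffs_getD durations 0 _ hr, List.getD_eq_getElem durations 0 hr]
      simp
    · by_cases hlast : i % durations.length + 1 = durations.length
      · -- the cycle tail is exhausted after this element; restart from the base
        have key : i + 1 = durations.length * (i / durations.length + 1) := by
          have hexp : durations.length * (i / durations.length + 1)
              = durations.length * (i / durations.length) + durations.length := by ring
          rw [hexp]; linarith
        have hq : (i + 1) / durations.length = i / durations.length + 1 := by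
          rw [key, Nat.mul_div_cancel_left _ hm]
        have hr' : (i + 1) % durations.length = 0 := by
          rw [key, Nat.mul_mod_right]
        have hrec := ih (i + 1)
        rw [hq, hr'] at hrec
        simp only [List.drop_zero, List.take_zero, List.sum_nil, add_zero] at hrec
        have hdrop : durations.drop (i % durations.length + 1) = [] := by
          rw [hlast]; exact List.drop_length
        obtain ⟨e, es, rfl⟩ : ∃ e es, durations = e :: es := by
          cases durations with
          | nil => exact absurd rfl hne
          | cons e es => exact ⟨e, es, rfl⟩
        rw [hdrop, beatcycleGo_restart, ← hrec]
        congr 1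
        have htot : ((e :: es).take (i % (e :: es).length)).sum + (e :: es)[i % (e :: es).length]
            = (e :: es).sum := by
          rw [← take_succ_sum _ _ hr, hlast, List.take_length]
        push_cast
        linarith
      · -- still inside the current cycle pass
        have key : (i % durations.length + 1) + durations.length * (i / durations.length) = i + 1 := by
          linarith
        have hq : (i + 1) / durations.length = i / durations.length := by
          rcases Nat.div_mod_unique hm |>.mpr ⟨key, by omega⟩ with ⟨h1, _⟩
          exact h1
        have hr' : (i + 1) % durations.length = i % durations.length + 1 := by
          rcases Nat.div_mod_unique hm |>.mpr ⟨key, by omega⟩ with ⟨_, h2⟩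
          exact h2
        have hrec := ih (i + 1)
        rw [hq, hr'] at hrec
        rw [← hrec]
        congr 1
        rw [take_succ_sum _ _ hr]
        ring

-- ===== VERDICT (by name: the statement is the Claim_ definition above) =====
theorem beatcycle_spec : Claim_equal_beatcycle := by
  intro pitches durations _ hpre
  unfold Spec_beatcycle beatcycle beatcycle_alt
  rcases hpre with hd | hp
  · have h := go_eq durations hd pitches 0
    simpa using h
  · subst hp; simp [beatcycleGo, altGo]
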